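-- pv_equiv track=rewrite | github.com/UIC-InDeXLab/HIRA | benchmark_area/quick_pruning/experiment_topk_subspace_or.py | _split_contiguous
-- ===== SOURCE A (Python) =====
-- def _split_contiguous(d: int, n_subspaces: int) -> list[tuple[int, int]]:
--     sub_dim = d // n_subspaces
--     remainder = d % n_subspaces
--     slices = []
--     offset = 0
--     for s in range(n_subspaces):
--         width = sub_dim + (1 if s < remainder else 0)
--         slices.append((offset, offset + width))
--         offset += width
--     return slices
-- ===== SOURCE B (Python) =====
-- def _split_contiguous(d: int, n_subspaces: int) -> list[tuple[int, int]]: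
--     sub_dim, remainder = divmod(d, n_subspaces)
--     return [(s * sub_dim + min(s, remainder),
--              (s + 1) * sub_dim + min(s + 1, remainder))
--             for s in range(n_subspaces)]
-- ===== Notes on version B (the rewrite author's own statement) =====
-- stated objective: simpler
-- what changed: The running offset accumulator is eliminated: each slice boundary is computed independently from the closed form s*sub_dim + min(s, remainder), so the body is a single list comprehension with no state carried across iterations.
import Mathlib
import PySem

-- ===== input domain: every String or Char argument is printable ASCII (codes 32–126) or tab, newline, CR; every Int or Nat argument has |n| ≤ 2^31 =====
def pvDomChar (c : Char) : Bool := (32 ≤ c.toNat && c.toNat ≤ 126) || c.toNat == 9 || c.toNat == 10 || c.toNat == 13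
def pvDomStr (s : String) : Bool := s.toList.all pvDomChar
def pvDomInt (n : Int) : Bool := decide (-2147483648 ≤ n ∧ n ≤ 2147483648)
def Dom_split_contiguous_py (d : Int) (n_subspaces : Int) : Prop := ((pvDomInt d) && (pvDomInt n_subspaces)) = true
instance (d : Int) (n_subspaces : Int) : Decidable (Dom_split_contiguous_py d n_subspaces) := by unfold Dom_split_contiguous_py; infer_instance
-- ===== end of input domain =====

-- B replaces A's running-offset accumulator by an independent closed-form boundary per index (simpler decomposition).


-- ===== PORT A =====
def split_contiguous_py (d : Int) (n_subspaces : Int) : List (Int × Int) :=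
  let sub_dim := PySem.Int.floordiv d n_subspaces
  let remainder := PySem.Int.mod d n_subspaces
  let st := (PySem.List.pyRange 0 n_subspaces 1).foldl
    (fun (st : List (Int × Int) × Int) s =>
      let width := sub_dim + (if s < remainder then 1 else 0)
      (st.1 ++ [(st.2, st.2 + width)], st.2 + width))
    ([], 0)
  st.1

-- ===== PORT B =====
def split_contiguous_py_alt (d : Int) (n_subspaces : Int) : List (Int × Int) :=
  let sub_dim := PySem.Int.floordiv d n_subspaces
  let remainder := PySem.Int.mod d n_subspaces
  (PySem.List.pyRange 0 n_subspaces 1).map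
    (fun s => (s * sub_dim + min s remainder, (s + 1) * sub_dim + min (s + 1) remainder))

-- ===== PRECONDITION & SPEC =====
-- Pre_ excludes only n_subspaces = 0, where both Pythons raise ZeroDivisionError.
def Pre_split_contiguous_py (d : Int) (n_subspaces : Int) : Prop := n_subspaces ≠ 0
instance (d : Int) (n_subspaces : Int) : Decidable (Pre_split_contiguous_py d n_subspaces) := by unfold Pre_split_contiguous_py; infer_instance
def pvWitness_split_contiguous_py : Int × Int := (10, 3)

def Spec_split_contiguous_py (d : Int) (n_subspaces : Int) (out : List (Int × Int)) : Prop := out = split_contiguous_py_alt d n_subspaces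
instance (d : Int) (n_subspaces : Int) (out : List (Int × Int)) : Decidable (Spec_split_contiguous_py d n_subspaces out) := by unfold Spec_split_contiguous_py; infer_instance

-- ===== CLAIM (what is proved, stated in full; the proofs are below) =====
def Claim_equal_split_contiguous_py : Prop := ∀ (d : Int) (n_subspaces : Int), Dom_split_contiguous_py d n_subspaces → Pre_split_contiguous_py d n_subspaces → Spec_split_contiguous_py d n_subspaces (split_contiguous_py d n_subspaces)

-- ===== LEMMAS AND PROOFS =====
-- Loop invariant: after folding range(0, m), A's slices are B's closed forms and the offset equals m*sub + min m r.
theorem pv_loop (sub r : Int) (hr : 0 ≤ r) (m : Nat) :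
    (PySem.List.pyRange 0 m 1).foldl
      (fun (st : List (Int × Int) × Int) s =>
        let width := sub + (if s < r then 1 else 0)
        (st.1 ++ [(st.2, st.2 + width)], st.2 + width)) ([], 0)
    = ((PySem.List.pyRange 0 m 1).map
        (fun s => (s * sub + min s r, (s + 1) * sub + min (s + 1) r)),
       m * sub + min (m : Int) r) := by
  induction m with
  | zero => simp [PySem.List.pyRange_one_eq_nil]; omega
  | succ k ih =>
      have h : ((k + 1 : Nat) : Int) = (k : Int) + 1 := by push_cast; ring
      rw [h, PySem.List.pyRange_one_succ_right (by exact_mod_cast Nat.zero_le k),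
          List.foldl_append, List.map_append, ih]
      simp only [List.foldl_cons, List.foldl_nil, List.map_cons, List.map_nil]
      have hmin : min ((k : Int) + 1) r = min (k : Int) r + (if (k : Int) < r then 1 else 0) := by
        by_cases hlt : (k : Int) < r
        · simp [min_eq_left (by omega : (k : Int) ≤ r), hlt]
        · simp [min_eq_right (by omega : r ≤ (k : Int)), min_eq_right (by omega : r ≤ (k : Int) + 1), hlt]
      have hoff : (k : Int) * sub + min (k : Int) r + (sub + (if (k : Int) < r then 1 else 0))
          = ((k : Int) + 1) * sub + min ((k : Int) + 1) r := by rw [hmin]; ring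
      rw [hoff]

-- ===== VERDICT (by name: the statement is the Claim_ definition above) =====
theorem split_contiguous_py_spec : Claim_equal_split_contiguous_py := by
  intro d n _ hn
  unfold Spec_split_contiguous_py split_contiguous_py split_contiguous_py_alt
  by_cases hle : n ≤ 0
  · simp [PySem.List.pyRange_one_eq_nil hle]
  · have hpos : 0 < n := by omega
    have hr : 0 ≤ PySem.Int.mod d n := PySem.Int.mod_nonneg d hpos
    have hcast : n = ((n.toNat : Nat) : Int) := by omega
    rw [hcast] at hr ⊢
    simp only [pv_loop _ _ hr]
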